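-- pv_equiv track=rewrite | github.com/jagorn/adaptive_controller | scripts/irun.py | separate_parameter
-- ===== SOURCE A (Python) =====
-- def separate_parameter(inlist):
--     list = []
--     arguments = []
--     for element in inlist:
--         if element == "--files:":
--             arguments = list
--             list = []
--         else:
--             list.append(element)
--     return (arguments,list)
-- ===== SOURCE B (Python) =====
-- def separate_parameter(inlist):
--     # Build the full table of delimiter-separated segments, then pick the last two.
--     segments = []
--     group = []
--     for x in inlist:
--         if x == "--files:":
--             segments.append(group)
--             group = []
--         else:
--             group.append(x)
--     segments.append(group)
--     return (segments[-2] if len(segments) >= 2 else [], segments[-1])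
-- ===== Notes on version B (the rewrite author's own statement) =====
-- stated objective: alternative
-- what changed: B builds the complete list of delimiter-separated segments in one pass and then selects the last two by negative indexing, instead of A's two running accumulators that overwrite 'arguments' at each delimiter.
import Mathlib
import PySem

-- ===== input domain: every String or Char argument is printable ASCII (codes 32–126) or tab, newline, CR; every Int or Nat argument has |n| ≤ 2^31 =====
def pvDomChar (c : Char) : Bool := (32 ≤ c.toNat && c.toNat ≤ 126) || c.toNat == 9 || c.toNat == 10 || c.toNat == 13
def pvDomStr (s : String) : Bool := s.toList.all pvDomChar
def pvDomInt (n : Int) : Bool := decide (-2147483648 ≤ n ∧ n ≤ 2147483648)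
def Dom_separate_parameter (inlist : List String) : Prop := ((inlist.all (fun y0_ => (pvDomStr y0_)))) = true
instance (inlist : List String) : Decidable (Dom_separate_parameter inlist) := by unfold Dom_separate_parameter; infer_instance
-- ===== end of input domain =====

-- B builds the full segment table in one pass and indexes the last two segments; alternative decomposition of A's two-accumulator scan.


-- ===== PORT A =====
-- state = (arguments, list); for each element: delimiter → arguments := list, list := []; else list.append(element)
def separate_parameter (inlist : List String) : List String × List String :=
  inlist.foldl
    (fun (s : List String × List String) element =>
      if element == "--files:" then (s.2, ([] : List String)) else (s.1, s.2 ++ [element]))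
    ([], [])

-- ===== PORT B =====
-- state = (segments, group); delimiter closes the current group; a final group is always appended,
-- then segments[-2] (if it exists) and segments[-1] are returned (negative indexing via PySem).
def separate_parameter_alt (inlist : List String) : List String × List String :=
  let st := inlist.foldl
    (fun (s : List (List String) × List String) x =>
      if x == "--files:" then (s.1 ++ [s.2], ([] : List String)) else (s.1, s.2 ++ [x]))
    ([], [])
  let segments := st.1 ++ [st.2]
  ((if 2 ≤ segments.length then (PySem.List.pyGet? segments (-2)).getD [] else []),
   (PySem.List.pyGet? segments (-1)).getD [])

-- ===== PRECONDITION & SPEC =====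
def Spec_separate_parameter (inlist : List String) (out : List String × List String) : Prop := out = separate_parameter_alt inlist
instance (inlist : List String) (out : List String × List String) : Decidable (Spec_separate_parameter inlist out) := by unfold Spec_separate_parameter; infer_instance

-- ===== CLAIM (what is proved, stated in full; the proofs are below) =====
def Claim_equal_separate_parameter : Prop := ∀ (inlist : List String), Dom_separate_parameter inlist → Spec_separate_parameter inlist (separate_parameter inlist)

-- ===== LEMMAS AND PROOFS =====

-- A's running state is determined by B's: arguments = last completed segment (or []), list = current group.
theorem sep_loop_invariant (xs : List String) :
    ∀ (segs : List (List String)) (g : List String),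
      xs.foldl
        (fun (s : List String × List String) element =>
          if element == "--files:" then (s.2, ([] : List String)) else (s.1, s.2 ++ [element]))
        (segs.getLastD [], g)
      = ((xs.foldl
            (fun (s : List (List String) × List String) x =>
              if x == "--files:" then (s.1 ++ [s.2], ([] : List String)) else (s.1, s.2 ++ [x]))
            (segs, g)).1.getLastD [],
         (xs.foldl
            (fun (s : List (List String) × List String) x =>
              if x == "--files:" then (s.1 ++ [s.2], ([] : List String)) else (s.1, s.2 ++ [x]))
            (segs, g)).2) := by
  induction xs with
  | nil => intro segs g; simp
  | cons x xs ih =>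
    intro segs g
    by_cases hx : x == "--files:"
    · simp only [List.foldl_cons, hx, if_true]
      have h1 : (segs ++ [g]).getLastD [] = g := by simp
      calc xs.foldl _ (g, ([] : List String))
          = xs.foldl _ ((segs ++ [g]).getLastD [], ([] : List String)) := by rw [h1]
        _ = _ := ih (segs ++ [g]) []
    · simp only [List.foldl_cons, hx]
      exact ih segs (g ++ [x])

theorem pyGet?_penult {α : Type} (S : List α) (G : α) (h : S ≠ []) :
    PySem.List.pyGet? (S ++ [G]) (-2) = some (S.getLast h) := by
  have hlen : 2 ≤ (S ++ [G]).length := by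
    have := List.length_pos_iff.mpr h
    simp [List.length_append]; omega
  rw [PySem.List.pyGet?_neg_ofNat (S ++ [G]) 2 (by omega) hlen]
  have hSlen : 0 < S.length := List.length_pos_iff.mpr h
  have hidx : (S ++ [G]).length - 2 = S.length - 1 := by
    simp [List.length_append]
  rw [hidx, List.getElem?_append_left (by omega)]
  rw [List.getElem?_eq_getElem (by omega)]
  simp [List.getLast_eq_getElem]

-- ===== VERDICT (by name: the statement is the Claim_ definition above) =====
theorem separate_parameter_spec : Claim_equal_separate_parameter := by
  intro inlist _
  unfold Spec_separate_parameter separate_parameter separate_parameter_alt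
  have h := sep_loop_invariant inlist [] []
  simp only [List.getLastD_nil] at h
  rw [h]
  set st := inlist.foldl
      (fun (s : List (List String) × List String) x =>
        if x == "--files:" then (s.1 ++ [s.2], ([] : List String)) else (s.1, s.2 ++ [x]))
      ([], []) with hst
  obtain ⟨S, G⟩ := st
  simp only
  refine Prod.ext ?_ ?_
  · by_cases hS : S = []
    · subst hS; simp
    · have h2 : 2 ≤ (S ++ [G]).length := by
        have := List.length_pos_iff.mpr hS
        simp [List.length_append]; omega
      rw [if_pos h2, pyGet?_penult S G hS]
      simp [List.getLastD_eq_getLast?, List.getLast?_eq_getLast_of_ne_nil hS]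
  · simp [PySem.List.pyGet?_neg_one_append_singleton]
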